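-- pv_equiv track=rewrite | github.com/rsy1026/sketching_piano_expression | parse_utils/parse_utils.py | make_onset_list_all
-- ===== SOURCE A (Python) =====
-- def make_onset_list_all(same_onset, out):
--     '''
--     get all notes in each onset
--     '''
--     new_out = list()
--     is_onset = [out[0]]
--     for i in range(1, len(out)):
--         o = same_onset[i]
--         if o == 0:
--             new_out.append(is_onset)
--             is_onset = [out[i]]
--         elif o == 1:
--             is_onset.append(out[i])
--     new_out.append(is_onset)
--     return new_out
-- ===== SOURCE B (Python) =====
-- def make_onset_list_all(same_onset, out):
--     '''
--     get all notes in each onset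
--     '''
--     bounds = [0] + [i for i in range(1, len(out)) if same_onset[i] == 0] + [len(out)]
--     return [[out[s]] + [out[j] for j in range(s + 1, e) if same_onset[j] == 1]
--             for s, e in zip(bounds, bounds[1:])]
-- ===== Notes on version B (the rewrite author's own statement) =====
-- stated objective: alternative
-- what changed: Replaces the single stateful accumulator loop by a two-phase decomposition: first compute the split boundaries (indices with flag 0), then build each group independently from its boundary segment.
import Mathlib
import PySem

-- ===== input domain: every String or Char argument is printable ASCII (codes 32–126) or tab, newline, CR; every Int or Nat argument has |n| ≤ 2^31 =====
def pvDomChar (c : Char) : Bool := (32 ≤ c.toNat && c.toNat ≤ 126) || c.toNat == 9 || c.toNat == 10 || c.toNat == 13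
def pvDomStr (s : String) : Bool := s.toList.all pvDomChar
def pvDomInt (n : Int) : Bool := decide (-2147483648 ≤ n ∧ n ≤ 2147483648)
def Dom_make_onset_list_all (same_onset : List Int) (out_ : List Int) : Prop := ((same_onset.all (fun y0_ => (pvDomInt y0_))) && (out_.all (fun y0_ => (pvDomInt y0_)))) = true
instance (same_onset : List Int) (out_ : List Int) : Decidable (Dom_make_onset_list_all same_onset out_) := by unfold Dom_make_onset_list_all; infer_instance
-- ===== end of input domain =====

-- B replaces A's stateful accumulator loop by a two-phase decomposition (compute split
-- boundaries, then build each group from its segment); same cost, different structure.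


-- ===== PORT A =====
def make_onset_list_all (same_onset : List Int) (out_ : List Int) : List (List Int) :=
  let st := (PySem.List.pyRange 1 (out_.length : Int) 1).foldl
    (fun (st : List (List Int) × List Int) i =>
      let o := PySem.List.pyGetD same_onset i 0
      if o = 0 then (st.1 ++ [st.2], [PySem.List.pyGetD out_ i 0])
      else if o = 1 then (st.1, st.2 ++ [PySem.List.pyGetD out_ i 0])
      else st)
    ([], [PySem.List.pyGetD out_ 0 0])
  st.1 ++ [st.2]

-- ===== PORT B =====
def make_onset_list_all_alt (same_onset : List Int) (out_ : List Int) : List (List Int) :=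
  let n : Int := out_.length
  let bounds : List Int :=
    0 :: ((PySem.List.pyRange 1 n 1).filter (fun i => decide (PySem.List.pyGetD same_onset i 0 = 0)) ++ [n])
  (bounds.zip bounds.tail).map (fun se =>
    PySem.List.pyGetD out_ se.1 0 ::
      ((PySem.List.pyRange (se.1 + 1) se.2 1).filter (fun j => decide (PySem.List.pyGetD same_onset j 0 = 1))).map
        (fun j => PySem.List.pyGetD out_ j 0))

-- ===== PRECONDITION & SPEC =====
-- Pre_ excludes exactly the inputs on which the Python A raises IndexError: empty out,
-- and same_onset shorter than out (when out has at least two notes, so same_onset[i] is read).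
def Pre_make_onset_list_all (same_onset : List Int) (out_ : List Int) : Prop :=
  out_ ≠ [] ∧ (out_.length = 1 ∨ out_.length ≤ same_onset.length)
instance (same_onset : List Int) (out_ : List Int) : Decidable (Pre_make_onset_list_all same_onset out_) := by unfold Pre_make_onset_list_all; infer_instance

def pvWitness_make_onset_list_all : List Int × List Int := ([9, 1, 0], [5, 6, 7])

def Spec_make_onset_list_all (same_onset : List Int) (out_ : List Int) (out : List (List Int)) : Prop := out = make_onset_list_all_alt same_onset out_
instance (same_onset : List Int) (out_ : List Int) (out : List (List Int)) : Decidable (Spec_make_onset_list_all same_onset out_ out) := by unfold Spec_make_onset_list_all; infer_instance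

-- ===== CLAIM (what is proved, stated in full; the proofs are below) =====
def Claim_equal_make_onset_list_all : Prop := ∀ (same_onset : List Int) (out_ : List Int), Dom_make_onset_list_all same_onset out_ → Pre_make_onset_list_all same_onset out_ → Spec_make_onset_list_all same_onset out_ (make_onset_list_all same_onset out_)

-- ===== LEMMAS AND PROOFS =====

-- the sequence of groups produced by A's loop when run over the index list `l`
-- with current group `cur` (proof-only characterisation of A)
def pvGroups (so out_ : List Int) : List Int → List Int → List (List Int)
  | [], cur => [cur]
  | i :: rest, cur =>
      let o := PySem.List.pyGetD so i 0
      if o = 0 then cur :: pvGroups so out_ rest [PySem.List.pyGetD out_ i 0]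
      else if o = 1 then pvGroups so out_ rest (cur ++ [PySem.List.pyGetD out_ i 0])
      else pvGroups so out_ rest cur

-- the group B builds for boundary pair (s, e)
def pvSeg (so out_ : List Int) (s e : Int) : List Int :=
  PySem.List.pyGetD out_ s 0 ::
    ((PySem.List.pyRange (s + 1) e 1).filter (fun j => decide (PySem.List.pyGetD so j 0 = 1))).map
      (fun j => PySem.List.pyGetD out_ j 0)

theorem pvFold_eq_groups (so out_ : List Int) (l : List Int) :
    ∀ (acc : List (List Int)) (cur : List Int),
    (let st := l.foldl
      (fun (st : List (List Int) × List Int) i =>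
        let o := PySem.List.pyGetD so i 0
        if o = 0 then (st.1 ++ [st.2], [PySem.List.pyGetD out_ i 0])
        else if o = 1 then (st.1, st.2 ++ [PySem.List.pyGetD out_ i 0])
        else st) (acc, cur)
     st.1 ++ [st.2]) = acc ++ pvGroups so out_ l cur := by
  induction l with
  | nil => intro acc cur; simp [pvGroups]
  | cons i rest ih =>
      intro acc cur
      simp only [List.foldl_cons, pvGroups]
      by_cases h0 : PySem.List.pyGetD so i 0 = 0
      · simp only [h0, reduceIte]
        rw [ih]
        simp
      · by_cases h1 : PySem.List.pyGetD so i 0 = 1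
        · simp only [h1, reduceIte]
          rw [ih]
          simp
        · simp only [h0, h1, reduceIte]
          rw [ih]

theorem pvKey (so out_ : List Int) (n : Int) :
    ∀ (m : Nat) (s k : Int), s < k → k ≤ n → (n - k).toNat = m →
    pvGroups so out_ (PySem.List.pyRange k n 1) (pvSeg so out_ s k)
      = ((s :: ((PySem.List.pyRange k n 1).filter (fun i => decide (PySem.List.pyGetD so i 0 = 0)) ++ [n])).zip
          ((PySem.List.pyRange k n 1).filter (fun i => decide (PySem.List.pyGetD so i 0 = 0)) ++ [n])).map
          (fun se => pvSeg so out_ se.1 se.2) := by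
  intro m
  induction m with
  | zero =>
      intro s k hsk hkn hm
      have hk : k = n := by omega
      subst hk
      rw [PySem.List.pyRange_one_eq_nil le_rfl]
      simp [pvGroups]
  | succ m ih =>
      intro s k hsk hkn hm
      have hkltn : k < n := by omega
      rw [PySem.List.pyRange_one_cons hkltn]
      simp only [pvGroups, List.filter_cons]
      by_cases h0 : PySem.List.pyGetD so k 0 = 0
      · rw [if_pos h0]
        have hseg : [PySem.List.pyGetD out_ k 0] = pvSeg so out_ k (k + 1) := by
          simp [pvSeg, PySem.List.pyRange_one_eq_nil (le_refl (k + 1))]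
        rw [hseg, ih k (k + 1) (by omega) (by omega) (by omega)]
        simp [h0]
      · rw [if_neg h0]
        by_cases h1 : PySem.List.pyGetD so k 0 = 1
        · rw [if_pos h1]
          have hseg : pvSeg so out_ s k ++ [PySem.List.pyGetD out_ k 0] = pvSeg so out_ s (k + 1) := by
            simp only [pvSeg, PySem.List.pyRange_one_succ_right (by omega : s + 1 ≤ k)]
            simp [h1]
          rw [hseg, ih s (k + 1) (by omega) (by omega) (by omega)]
          simp [h0]
        · rw [if_neg h1]
          have hseg : pvSeg so out_ s k = pvSeg so out_ s (k + 1) := by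
            simp only [pvSeg, PySem.List.pyRange_one_succ_right (by omega : s + 1 ≤ k)]
            simp [h1]
          rw [hseg, ih s (k + 1) (by omega) (by omega) (by omega)]
          simp [h0]

-- ===== VERDICT (by name: the statement is the Claim_ definition above) =====
theorem make_onset_list_all_spec : Claim_equal_make_onset_list_all := by
  intro same_onset out_ _ hpre
  unfold Spec_make_onset_list_all make_onset_list_all make_onset_list_all_alt
  have hne : out_ ≠ [] := hpre.1
  have hlen : (1 : Int) ≤ (out_.length : Int) := by
    cases out_ with
    | nil => exact absurd rfl hne
    | cons x xs => simp
  rw [pvFold_eq_groups]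
  have hseg0 : [PySem.List.pyGetD out_ 0 0] = pvSeg same_onset out_ 0 1 := by
    simp [pvSeg, PySem.List.pyRange_one_eq_nil]
  rw [hseg0, pvKey same_onset out_ (out_.length : Int) ((out_.length : Int) - 1).toNat 0 1
        (by omega) hlen (by omega)]
  simp [pvSeg]
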